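-- pv_equiv track=rewrite | github.com/Trieuh2/job-listing-scraper | src/utils.py | get_next_page_url
-- ===== SOURCE A (Python) =====
-- def get_next_page_url(url: str) -> str:
--     """
--     Returns the URL for the next page of job listings.
--
--     Args:
--         url (str): The URL of the current page of job listings.
--
--     Returns:
--         str: The URL for the next page of job listings.
--     """
--     start_tag = "&start="
--     start_index = url.find(start_tag)
--     if start_index == -1:
--         return url + f"{start_tag}10"
--     else:
--         end_index = start_index + len(start_tag)
--         while end_index < len(url) and url[end_index].isdigit():
--             end_index += 1
--         current_page = int(url[start_index + len(start_tag):end_index])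
--         return url[:start_index] + f"{start_tag}{current_page + 10}" + url[end_index:]
-- ===== SOURCE B (Python) =====
-- def get_next_page_url(url: str) -> str:
--     """One-pass streaming scanner: copy characters into an output buffer until
--     the '&start=' marker starts at the cursor, then collect its digit run,
--     emit the incremented parameter and the untouched tail.  No find(), no
--     index slicing of the head, no staged passes."""
--     out = []
--     i, n = 0, len(url)
--     while i < n:
--         if url.startswith("&start=", i):
--             digits = []
--             i += 7
--             while i < n and url[i].isdigit():
--                 digits.append(url[i])
--                 i += 1
--             return "".join(out) + "&start=" + str(int("".join(digits)) + 10) + url[i:]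
--         out.append(url[i])
--         i += 1
--     return url + "&start=10"
-- ===== Notes on version B (the rewrite author's own statement) =====
-- stated objective: alternative
-- what changed: Replaces A's staged find/slice/splice (locate '&start=' with find, index-walk the digits, int() a slice, rebuild from three slices) by a single left-to-right streaming scanner that copies characters into an output accumulator until the marker starts at the cursor, then collects the digit run into a buffer and emits the incremented parameter followed by the untouched tail.
import Mathlib
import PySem

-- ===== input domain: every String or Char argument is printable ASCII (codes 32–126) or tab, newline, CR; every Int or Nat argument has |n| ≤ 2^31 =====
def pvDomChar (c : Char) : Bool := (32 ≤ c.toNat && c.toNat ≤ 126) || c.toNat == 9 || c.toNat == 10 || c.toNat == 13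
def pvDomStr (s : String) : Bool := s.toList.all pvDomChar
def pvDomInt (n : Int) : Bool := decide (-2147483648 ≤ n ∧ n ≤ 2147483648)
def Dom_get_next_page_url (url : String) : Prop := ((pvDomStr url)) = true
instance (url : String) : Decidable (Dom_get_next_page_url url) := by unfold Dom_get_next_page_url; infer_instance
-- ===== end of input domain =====

-- B replaces A's staged find/slice/int/splice by a one-pass streaming scanner with an output accumulator (alternative decomposition, same cost).

-- ===== PORT A =====
-- A's while loop: advance end_index while in range and the character is a digit
def pvScanA (s : List Char) (e : Nat) : Nat :=
  if h : e < s.length then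
    if PySem.Chars.isdigit s[e] then pvScanA s (e + 1) else e
  else e
termination_by s.length - e

def get_next_page_url (url : String) : String :=
  let start_tag : List Char := "&start=".toList
  let s := url.toList
  let start_index : Int := PySem.Chars.find s start_tag
  if start_index = -1 then
    String.ofList (s ++ (start_tag ++ "10".toList))
  else
    let end_index := pvScanA s (start_index.toNat + start_tag.length)
    -- int('') raises ValueError in Python: those inputs are excluded by Pre_, so .getD 0 is never reached there
    let current_page := (PySem.Int.ofChars? (PySem.List.slice s (some (start_index + (start_tag.length : Int))) (some (end_index : Int)))).getD 0
    String.ofList (PySem.List.slice s none (some start_index) ++ (start_tag ++ PySem.Int.toChars (current_page + 10)) ++ PySem.List.slice s (some (end_index : Int)) none)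

-- ===== PORT B =====
-- Source B's inner while: collect the digit run starting at i into the buffer ds, return (buffer, new cursor)
def pvCollectB (s : List Char) (i : Nat) (ds : List Char) : List Char × Nat :=
  if h : i < s.length then
    if PySem.Chars.isdigit s[i] then pvCollectB s (i + 1) (ds ++ [s[i]]) else (ds, i)
  else (ds, i)
termination_by s.length - i

-- Source B's outer while: copy chars into out until url.startswith("&start=", i) fires
def pvScanB (s : List Char) (i : Nat) (out : List Char) : List Char :=
  if h : i < s.length then
    if PySem.Chars.startswith (s.drop i) "&start=".toList then
      let r := pvCollectB s (i + 7) []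
      -- int('') raises ValueError in Python: excluded by Pre_, so .getD 0 is never reached there
      out ++ "&start=".toList ++ PySem.Int.toChars ((PySem.Int.ofChars? r.1).getD 0 + 10) ++ s.drop r.2
    else pvScanB s (i + 1) (out ++ [s[i]])
  else s ++ "&start=10".toList
termination_by s.length - i

def get_next_page_url_alt (url : String) : String := String.ofList (pvScanB url.toList 0 [])

-- ===== PRECONDITION & SPEC =====
-- Pre_ excludes exactly the urls whose first '&start=' is not followed by a digit: there both
-- A and B raise ValueError (int('') of the empty digit run).
def Pre_get_next_page_url (url : String) : Prop :=
  PySem.Chars.find url.toList "&start=".toList = -1 ∨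
    PySem.Chars.isdigit (((url.toList.drop ((PySem.Chars.find url.toList "&start=".toList).toNat + 7)).headD ' ')) = true
instance (url : String) : Decidable (Pre_get_next_page_url url) := by unfold Pre_get_next_page_url; infer_instance
def pvWitness_get_next_page_url : String := "x?q=a&start=20&b=c"

def Spec_get_next_page_url (url : String) (out : String) : Prop := out = get_next_page_url_alt url
instance (url : String) (out : String) : Decidable (Spec_get_next_page_url url out) := by unfold Spec_get_next_page_url; infer_instance

-- ===== CLAIM (what is proved, stated in full; the proofs are below) =====
def Claim_equal_get_next_page_url : Prop := ∀ (url : String), Dom_get_next_page_url url → Pre_get_next_page_url url → Spec_get_next_page_url url (get_next_page_url url)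

-- ===== LEMMAS AND PROOFS =====

-- A's while loop computes e + (length of the digit run starting at e)
theorem pvScanA_eq (s : List Char) (e : Nat) :
    pvScanA s e = e + ((s.drop e).takeWhile PySem.Chars.isdigit).length := by
  induction' hn : s.length - e using Nat.strong_induction_on with n ih generalizing e
  rw [pvScanA]
  by_cases h : e < s.length
  · have hd : s.drop e = s[e] :: s.drop (e + 1) := by
      rw [List.drop_eq_getElem_cons h]
    by_cases hdig : PySem.Chars.isdigit s[e]
    · simp only [h, hdig, dif_pos, if_pos]
      rw [ih (s.length - (e + 1)) (by omega) (e + 1) rfl, hd, List.takeWhile_cons, hdig]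
      simp; omega
    · simp only [h, dif_pos, hdig, if_neg, Bool.false_eq_true, not_false_iff]
      rw [hd, List.takeWhile_cons]
      simp [hdig]
  · have : s.drop e = [] := List.drop_eq_nil_of_le (by omega)
    simp [h, this]

-- B's inner while appends exactly the digit run starting at i and lands the cursor after it
theorem pvCollectB_eq (s : List Char) (i : Nat) (ds : List Char) :
    pvCollectB s i ds = (ds ++ (s.drop i).takeWhile PySem.Chars.isdigit,
      i + ((s.drop i).takeWhile PySem.Chars.isdigit).length) := by
  induction' hn : s.length - i using Nat.strong_induction_on with n ih generalizing i ds
  rw [pvCollectB]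
  by_cases h : i < s.length
  · have hd : s.drop i = s[i] :: s.drop (i + 1) := by
      rw [List.drop_eq_getElem_cons h]
    by_cases hdig : PySem.Chars.isdigit s[i]
    · simp only [h, hdig, dif_pos, if_pos]
      rw [ih (s.length - (i + 1)) (by omega) (i + 1) _ rfl, hd, List.takeWhile_cons, hdig]
      simp; omega
    · simp only [h, dif_pos, hdig, if_neg, Bool.false_eq_true, not_false_iff]
      rw [hd, List.takeWhile_cons]
      simp [hdig]
  · have : s.drop i = [] := List.drop_eq_nil_of_le (by omega)
    simp [h, this]

-- when the url has no '&start=' at all, B's scanner runs off the end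
theorem pvScanB_no_tag (s : List Char) (hno : ¬ ("&start=".toList <:+: s)) :
    ∀ i out, pvScanB s i out = s ++ "&start=10".toList := by
  intro i
  induction' hn : s.length - i using Nat.strong_induction_on with n ih generalizing i
  intro out
  rw [pvScanB]
  by_cases h : i < s.length
  · have hsw : PySem.Chars.startswith (s.drop i) "&start=".toList = false := by
      rw [Bool.eq_false_iff]
      intro hsw
      exact hno ((PySem.Chars.isIn_iff_infix _ _).mp
        ((PySem.Chars.exists_prefix_drop_iff_isIn _ _).mp
          ⟨i, (PySem.Chars.startswith_iff _ _).mp hsw⟩))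
    simp only [h, dif_pos, hsw, Bool.false_eq_true, if_neg, not_false_iff]
    exact ih (s.length - (i + 1)) (by omega) (i + 1) rfl _
  · simp [h]

-- when the first '&start=' sits at k, B's scanner reaches k with out = s.take k and fires there
theorem pvScanB_reach (s : List Char) (k : Nat)
    (hpre : "&start=".toList <+: s.drop k)
    (hmin : ∀ j, j < k → ¬ ("&start=".toList <+: s.drop j)) :
    ∀ i, i ≤ k → pvScanB s i (s.take i) =
      s.take k ++ "&start=".toList ++
        PySem.Int.toChars ((PySem.Int.ofChars? ((s.drop (k + 7)).takeWhile PySem.Chars.isdigit)).getD 0 + 10) ++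
        s.drop (k + 7 + ((s.drop (k + 7)).takeWhile PySem.Chars.isdigit).length) := by
  have hklen : k < s.length := by
    have h7 : ("&start=".toList).length ≤ (s.drop k).length := hpre.length_le
    simp only [List.length_drop] at h7
    have : (("&start=".toList)).length = 7 := rfl
    omega
  intro i hi
  induction' hn : k - i using Nat.strong_induction_on with n ih generalizing i
  rw [pvScanB]
  by_cases hik : i = k
  · subst hik
    have hsw : PySem.Chars.startswith (s.drop i) "&start=".toList = true :=
      (PySem.Chars.startswith_iff _ _).mpr hpre
    simp only [hklen, dif_pos, hsw, if_pos, pvCollectB_eq, List.nil_append]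
  · have hi' : i < k := by omega
    have h : i < s.length := by omega
    have hsw : PySem.Chars.startswith (s.drop i) "&start=".toList = false := by
      rw [Bool.eq_false_iff]
      intro hsw
      exact hmin i hi' ((PySem.Chars.startswith_iff _ _).mp hsw)
    simp only [h, dif_pos, hsw, Bool.false_eq_true, if_neg, not_false_iff]
    have htake : s.take i ++ [s[i]] = s.take (i + 1) := by
      rw [List.take_add_one, List.getElem?_eq_getElem h]
      rfl
    rw [htake]
    exact ih (k - (i + 1)) (by omega) (i + 1) (by omega) rfl

theorem pv_take_len_takeWhile (p : Char → Bool) (l : List Char) :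
    l.take (l.takeWhile p).length = l.takeWhile p := by
  have key : l = l.takeWhile p ++ l.dropWhile p := (List.takeWhile_append_dropWhile (p := p) (l := l)).symm
  calc l.take (l.takeWhile p).length
      = (l.takeWhile p ++ l.dropWhile p).take (l.takeWhile p).length := by rw [← key]
    _ = l.takeWhile p := List.take_left

-- ===== VERDICT (by name: the statement is the Claim_ definition above) =====
theorem get_next_page_url_spec : Claim_equal_get_next_page_url := by
  intro url _hdom _hpre
  unfold Spec_get_next_page_url get_next_page_url get_next_page_url_alt
  by_cases hfind : PySem.Chars.find url.toList "&start=".toList = -1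
  · -- no occurrence: both sides append "&start=10"
    have hno : ¬ ("&start=".toList <:+: url.toList) :=
      (PySem.Chars.find_eq_neg_one_iff _ _).mp hfind
    simp only [hfind, if_pos]
    rw [pvScanB_no_tag _ hno 0 []]
    rfl
  · have h0 : (0 : Int) ≤ PySem.Chars.find url.toList "&start=".toList := by
      have := PySem.Chars.neg_one_le_find (s := url.toList) (sub := "&start=".toList)
      omega
    obtain ⟨hpre, hmin⟩ := PySem.Chars.find_spec (s := url.toList) (sub := "&start=".toList) h0
    obtain ⟨k, hk⟩ : ∃ k : Nat, PySem.Chars.find url.toList "&start=".toList = (k : Int) :=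
      ⟨_, (Int.toNat_of_nonneg h0).symm⟩
    have hkt : (PySem.Chars.find url.toList "&start=".toList).toNat = k := by omega
    rw [hkt] at hpre hmin
    have hkne : ¬ ((k : Int) = -1) := by omega
    simp only [hk, hkne, if_neg, not_false_iff, Int.toNat_natCast]
    have h7 : ("&start=".toList).length = 7 := rfl
    simp only [h7]
    rw [show ([] : List Char) = url.toList.take 0 from rfl,
        pvScanB_reach url.toList k hpre hmin 0 (by omega), pvScanA_eq]
    -- turn A's three slices into take / takeWhile / drop
    have hc : ((k : Int) + ((7 : Nat) : Int)) = (((k + 7 : Nat)) : Int) := by push_cast; ring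
    rw [hc]
    have hcast2 : (((k + 7) + ((url.toList.drop (k + 7)).takeWhile PySem.Chars.isdigit).length : Nat) : Int)
        = (((k + 7 : Nat)) : Int) + ((((url.toList.drop (k + 7)).takeWhile PySem.Chars.isdigit).length : Nat) : Int) := by
      push_cast; ring
    rw [hcast2, PySem.List.slice_natCast_add, PySem.List.slice_to_natCast, ← hcast2,
        PySem.List.slice_from_natCast]
    simp only [pv_take_len_takeWhile, List.append_assoc]
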